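-- pv_equiv track=rewrite | github.com/Thunderrr2022/Workly_Research_CodematiAi | backend/agents/synthesizer_agent.py | _group_by_theme
-- ===== SOURCE A (Python) =====
-- from typing import List, Dict, Any, Optional, Tuple
--
-- def _group_by_theme(documents: List[Dict[str, Any]]) -> Dict[str, List[Dict[str, Any]]]:
--     """Group document chunks into rough themes using simple keyword buckets."""
--     buckets: Dict[str, List[Dict[str, Any]]] = {}
--     themes = {
--         'Applications': ['apply', 'application', 'use case', 'usage', 'deploy', 'implement'],
--         'Challenges': ['challenge', 'limitation', 'issue', 'risk', 'barrier', 'problem'],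
--         'Ethics': ['ethic', 'privacy', 'bias', 'fairness', 'transparen', 'accountab'],
--         'Methodology': ['method', 'approach', 'algorithm', 'model', 'technique', 'framework'],
--         'Results': ['result', 'finding', 'evaluation', 'experiment', 'performance'],
--     }
--     for doc in documents:
--         text = doc.get('content', '').lower()
--         matched = False
--         for theme, kws in themes.items():
--             if any(kw in text for kw in kws):
--                 buckets.setdefault(theme, []).append(doc)
--                 matched = True
--                 break
--         if not matched:
--             buckets.setdefault('General', []).append(doc)
--     return buckets
-- ===== SOURCE B (Python) =====
-- from typing import List, Dict, Any
--
-- def _group_by_theme(documents: List[Dict[str, Any]]) -> Dict[str, List[Dict[str, Any]]]: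
--     """Classify-then-group: phase 1 assigns each document a theme label theme-major
--     (earliest theme in the fixed order wins); phase 2 groups documents by label in
--     document order, so bucket keys appear in first-occurrence order like A's."""
--     themes = [
--         ('Applications', ['apply', 'application', 'use case', 'usage', 'deploy', 'implement']),
--         ('Challenges', ['challenge', 'limitation', 'issue', 'risk', 'barrier', 'problem']),
--         ('Ethics', ['ethic', 'privacy', 'bias', 'fairness', 'transparen', 'accountab']),
--         ('Methodology', ['method', 'approach', 'algorithm', 'model', 'technique', 'framework']),
--         ('Results', ['result', 'finding', 'evaluation', 'experiment', 'performance']),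
--     ]
--     texts = [doc.get('content', '').lower() for doc in documents]
--     labels: List[Any] = [None] * len(documents)
--     for theme, kws in themes:
--         labels = [theme if lab is None and any(kw in text for kw in kws) else lab
--                   for lab, text in zip(labels, texts)]
--     buckets: Dict[str, List[Dict[str, Any]]] = {}
--     for doc, lab in zip(documents, labels):
--         buckets.setdefault(lab if lab is not None else 'General', []).append(doc)
--     return buckets
-- ===== Notes on version B (the rewrite author's own statement) =====
-- stated objective: alternative
-- what changed: B replaces A's per-document inner scan over the theme table (first match with break) by a two-phase classify-then-group: a theme-major pass that assigns each document a label (earliest theme wins), then a single grouping pass over documents in order.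
import Mathlib
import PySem

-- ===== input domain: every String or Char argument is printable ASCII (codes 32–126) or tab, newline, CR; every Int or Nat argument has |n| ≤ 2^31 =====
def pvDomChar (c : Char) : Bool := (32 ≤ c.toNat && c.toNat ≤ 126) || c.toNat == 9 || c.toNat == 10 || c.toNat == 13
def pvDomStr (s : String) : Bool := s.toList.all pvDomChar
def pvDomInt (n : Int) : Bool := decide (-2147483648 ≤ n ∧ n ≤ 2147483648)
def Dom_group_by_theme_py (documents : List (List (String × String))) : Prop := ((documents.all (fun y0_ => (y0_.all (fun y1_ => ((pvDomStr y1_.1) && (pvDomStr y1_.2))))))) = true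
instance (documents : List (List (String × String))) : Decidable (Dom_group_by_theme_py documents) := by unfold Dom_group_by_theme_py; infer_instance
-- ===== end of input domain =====

-- B is an alternative decomposition of the same task (classify each document, then group by label);
-- it is not claimed faster. A = B exactly; no precondition.

-- ===== PORT A =====
-- the fixed themes table of A (dict iterated in insertion order)
def pvThemesA : List (String × List String) :=
  [("Applications", ["apply", "application", "use case", "usage", "deploy", "implement"]),
   ("Challenges", ["challenge", "limitation", "issue", "risk", "barrier", "problem"]),
   ("Ethics", ["ethic", "privacy", "bias", "fairness", "transparen", "accountab"]),
   ("Methodology", ["method", "approach", "algorithm", "model", "technique", "framework"]),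
   ("Results", ["result", "finding", "evaluation", "experiment", "performance"])]

-- A's inner 'for theme, kws in themes.items(): … break' with the matched flag:
-- first matching theme gets setdefault+append (= Dict.modify), else the 'General' bucket.
def pvDocStepA : List (String × List String) → String → List (String × String) →
    PySem.Dict String (List (List (String × String))) → PySem.Dict String (List (List (String × String)))
  | [], _, doc, b => b.modify "General" [] (· ++ [doc])
  | (theme, kws) :: rest, text, doc, b =>
      if kws.any (fun kw => PySem.Str.isIn kw text) then b.modify theme [] (· ++ [doc])
      else pvDocStepA rest text doc b

def group_by_theme_py (documents : List (List (String × String))) : List (String × List (List (String × String))) :=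
  (documents.foldl
    (fun b doc => pvDocStepA pvThemesA (PySem.Str.lower ((PySem.Dict.mk doc).getD "content" "")) doc b)
    PySem.Dict.empty).items

-- ===== PORT B =====
def pvThemesB : List (String × List String) :=
  [("Applications", ["apply", "application", "use case", "usage", "deploy", "implement"]),
   ("Challenges", ["challenge", "limitation", "issue", "risk", "barrier", "problem"]),
   ("Ethics", ["ethic", "privacy", "bias", "fairness", "transparen", "accountab"]),
   ("Methodology", ["method", "approach", "algorithm", "model", "technique", "framework"]),
   ("Results", ["result", "finding", "evaluation", "experiment", "performance"])]

def group_by_theme_py_alt (documents : List (List (String × String))) : List (String × List (List (String × String))) :=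
  let texts := documents.map (fun doc => PySem.Str.lower ((PySem.Dict.mk doc).getD "content" ""))
  let labels := pvThemesB.foldl
    (fun labels tk => (labels.zip texts).map
      (fun p => if p.1 = none ∧ tk.2.any (fun kw => PySem.Str.isIn kw p.2) then some tk.1 else p.1))
    (documents.map (fun _ => (none : Option String)))
  ((documents.zip labels).foldl
    (fun b p => b.modify (p.2.getD "General") [] (· ++ [p.1]))
    PySem.Dict.empty).items

-- ===== PRECONDITION & SPEC =====
def Spec_group_by_theme_py (documents : List (List (String × String))) (out : List (String × List (List (String × String)))) : Prop := out = group_by_theme_py_alt documents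
instance (documents : List (List (String × String))) (out : List (String × List (List (String × String)))) : Decidable (Spec_group_by_theme_py documents out) := by unfold Spec_group_by_theme_py; infer_instance

-- ===== CLAIM (what is proved, stated in full; the proofs are below) =====
def Claim_equal_group_by_theme_py : Prop := ∀ (documents : List (List (String × String))), Dom_group_by_theme_py documents → Spec_group_by_theme_py documents (group_by_theme_py documents)

-- ===== LEMMAS AND PROOFS =====

-- first theme (in table order) whose keyword list matches the text
def pvFM : List (String × List String) → String → Option String
  | [], _ => none
  | (theme, kws) :: rest, t =>
      if kws.any (fun kw => PySem.Str.isIn kw t) then some theme else pvFM rest t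

theorem pvFM_append (l1 l2 : List (String × List String)) (t : String) :
    pvFM (l1 ++ l2) t = (pvFM l1 t).or (pvFM l2 t) := by
  induction l1 with
  | nil => rfl
  | cons h rest ih =>
      obtain ⟨th, kws⟩ := h
      simp only [List.cons_append, pvFM, ih]
      by_cases hm : (kws.any fun kw => PySem.Str.isIn kw t) = true
      · simp only [if_pos hm]; rfl
      · simp only [if_neg hm]

theorem pvDocStepA_eq (ts : List (String × List String)) (t : String)
    (d : List (String × String)) (b : PySem.Dict String (List (List (String × String)))) :
    pvDocStepA ts t d b = b.modify ((pvFM ts t).getD "General") [] (· ++ [d]) := by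
  induction ts generalizing b with
  | nil => rfl
  | cons h rest ih =>
      obtain ⟨th, kws⟩ := h
      simp only [pvDocStepA, pvFM, ih]
      by_cases hm : (kws.any fun kw => PySem.Str.isIn kw t) = true
      · simp only [if_pos hm]; rfl
      · simp only [if_neg hm]

theorem pvZipMapLeft {α β : Type} (l : List α) (f : α → β) :
    (l.map f).zip l = l.map (fun x => (f x, x)) := by
  induction l with
  | nil => rfl
  | cons x xs ih => simp [ih]

theorem pvZipMapRight {α β : Type} (l : List α) (f : α → β) :
    l.zip (l.map f) = l.map (fun x => (x, f x)) := by
  induction l with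
  | nil => rfl
  | cons x xs ih => simp [ih]

theorem pvLabelsFold (ts done : List (String × List String)) (texts : List String) :
    ts.foldl
      (fun labels tk => (labels.zip texts).map
        (fun p => if p.1 = none ∧ tk.2.any (fun kw => PySem.Str.isIn kw p.2) then some tk.1 else p.1))
      (texts.map (fun t => pvFM done t))
    = texts.map (fun t => pvFM (done ++ ts) t) := by
  induction ts generalizing done with
  | nil => simp
  | cons tk rest ih =>
      obtain ⟨th, kws⟩ := tk
      rw [List.foldl_cons]
      have hstep :
          ((texts.map (fun t => pvFM done t)).zip texts).map
            (fun p => if p.1 = none ∧ kws.any (fun kw => PySem.Str.isIn kw p.2) then some th else p.1)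
          = texts.map (fun t => pvFM (done ++ [(th, kws)]) t) := by
        rw [pvZipMapLeft, List.map_map]
        refine List.map_congr_left (fun t _ => ?_)
        show (if pvFM done t = none ∧ (kws.any fun kw => PySem.Str.isIn kw t) = true
              then some th else pvFM done t) = pvFM (done ++ [(th, kws)]) t
        rw [pvFM_append]
        cases h : pvFM done t with
        | some x => simp
        | none => simp only [Option.none_or, true_and, pvFM]
      rw [hstep]
      have h2 := ih (done ++ [(th, kws)])
      rwa [List.append_assoc, List.singleton_append] at h2

theorem group_by_theme_eq (documents : List (List (String × String))) :
    group_by_theme_py documents = group_by_theme_py_alt documents := by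
  unfold group_by_theme_py group_by_theme_py_alt
  have hthemes : pvThemesB = pvThemesA := rfl
  rw [hthemes]
  dsimp only
  have hinit :
      documents.map (fun _ => (none : Option String))
        = (documents.map (fun doc => PySem.Str.lower ((PySem.Dict.mk doc).getD "content" ""))).map
            (fun t => pvFM [] t) := by
    simp [List.map_map, Function.comp_def, pvFM]
  rw [hinit, pvLabelsFold, List.map_map, List.nil_append]
  rw [pvZipMapRight, List.foldl_map]
  congr 1
  have hf : (fun (b : PySem.Dict String (List (List (String × String)))) (doc : List (String × String)) =>
        pvDocStepA pvThemesA (PySem.Str.lower ((PySem.Dict.mk doc).getD "content" "")) doc b)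
      = fun b doc =>
        b.modify ((pvFM pvThemesA (PySem.Str.lower ((PySem.Dict.mk doc).getD "content" ""))).getD "General")
          [] (· ++ [doc]) := by
    funext b doc
    exact pvDocStepA_eq _ _ _ _
  rw [hf]
  rfl

-- ===== VERDICT (by name: the statement is the Claim_ definition above) =====
theorem group_by_theme_py_spec : Claim_equal_group_by_theme_py := by
  intro documents _
  unfold Spec_group_by_theme_py
  exact group_by_theme_eq documents
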